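-- pv_equiv track=rewrite | github.com/MahdiNavaei/daily-activity | utils.py | get_activity_summary
-- ===== SOURCE A (Python) =====
-- from typing import List, Dict
--
-- def get_activity_summary(activities: List[str]) -> Dict[str, int]:
--     """Get summary of activity types"""
--     summary = {
--         "ml_development": 0,
--         "data_engineering": 0,
--         "research": 0,
--         "infrastructure": 0
--     }
--     # Simple categorization logic
--     for activity in activities:
--         activity_lower = activity.lower()
--         if any(keyword in activity_lower for keyword in ["model", "training", "inference", "llm", "rag"]):
--             summary["ml_development"] += 1
--         elif any(keyword in activity_lower for keyword in ["data", "etl", "pipeline", "sql"]):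
--             summary["data_engineering"] += 1
--         elif any(keyword in activity_lower for keyword in ["experiment", "research", "benchmark", "evaluat"]):
--             summary["research"] += 1
--         else:
--             summary["infrastructure"] += 1
--     return summary
-- ===== SOURCE B (Python) =====
-- RULES = [
--     ("ml_development", ("model", "training", "inference", "llm", "rag")),
--     ("data_engineering", ("data", "etl", "pipeline", "sql")),
--     ("research", ("experiment", "research", "benchmark", "evaluat")),
-- ]
--
-- def get_activity_summary(activities):
--     # Staged sieve: one filtering pass per category over the shrinking pool,
--     # instead of classifying each activity with an if/elif chain.
--     remaining = [a.lower() for a in activities]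
--     summary = {}
--     for cat, kws in RULES:
--         hits = [a for a in remaining if any(k in a for k in kws)]
--         remaining = [a for a in remaining if not any(k in a for k in kws)]
--         summary[cat] = len(hits)
--     summary["infrastructure"] = len(remaining)
--     return summary
-- ===== Notes on version B (the rewrite author's own statement) =====
-- stated objective: alternative
-- what changed: Replaces A's single pass with a per-item if/elif chain and dict increments by a staged sieve: one filtering pass per category over a shrinking pool of lowered activities, recording each stage's hit count and the final leftover as infrastructure.
import Mathlib
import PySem

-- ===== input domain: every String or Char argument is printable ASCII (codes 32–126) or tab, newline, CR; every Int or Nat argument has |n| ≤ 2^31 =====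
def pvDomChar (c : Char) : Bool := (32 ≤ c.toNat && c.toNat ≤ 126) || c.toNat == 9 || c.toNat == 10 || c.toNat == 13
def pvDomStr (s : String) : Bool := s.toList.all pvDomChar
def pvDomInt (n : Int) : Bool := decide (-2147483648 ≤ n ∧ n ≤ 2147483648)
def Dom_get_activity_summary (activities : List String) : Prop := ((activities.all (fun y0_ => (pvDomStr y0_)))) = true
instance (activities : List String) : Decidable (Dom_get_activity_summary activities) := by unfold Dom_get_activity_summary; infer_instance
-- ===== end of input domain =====

-- B replaces A's per-item if/elif classification loop by a staged sieve: one filtering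
-- pass per category over a shrinking pool of lowered activities; objective: alternative.

-- ===== PORT A =====
def get_activity_summary (activities : List String) : List (String × Int) :=
  let summary : PySem.Dict String Int :=
    PySem.Dict.ofList [("ml_development", 0), ("data_engineering", 0), ("research", 0), ("infrastructure", 0)]
  let final := activities.foldl (fun d activity =>
    let activity_lower := PySem.Str.lower activity
    if (["model", "training", "inference", "llm", "rag"].any (fun k => PySem.Str.isIn k activity_lower)) then
      d.insert "ml_development" (d.getD "ml_development" 0 + 1)
    else if (["data", "etl", "pipeline", "sql"].any (fun k => PySem.Str.isIn k activity_lower)) then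
      d.insert "data_engineering" (d.getD "data_engineering" 0 + 1)
    else if (["experiment", "research", "benchmark", "evaluat"].any (fun k => PySem.Str.isIn k activity_lower)) then
      d.insert "research" (d.getD "research" 0 + 1)
    else
      d.insert "infrastructure" (d.getD "infrastructure" 0 + 1)) summary
  final.items

-- ===== PORT B =====
def pvRules : List (String × List String) :=
  [("ml_development", ["model", "training", "inference", "llm", "rag"]),
   ("data_engineering", ["data", "etl", "pipeline", "sql"]),
   ("research", ["experiment", "research", "benchmark", "evaluat"])]

def get_activity_summary_alt (activities : List String) : List (String × Int) :=
  let remaining := activities.map PySem.Str.lower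
  let st : List String × PySem.Dict String Int := pvRules.foldl
    (fun st r =>
      let hits := st.1.filter (fun a => r.2.any (fun k => PySem.Str.isIn k a))
      let rem := st.1.filter (fun a => !(r.2.any (fun k => PySem.Str.isIn k a)))
      (rem, st.2.insert r.1 (hits.length : Int)))
    (remaining, PySem.Dict.empty)
  (st.2.insert "infrastructure" (st.1.length : Int)).items

-- ===== PRECONDITION & SPEC =====
def Spec_get_activity_summary (activities : List String) (out : List (String × Int)) : Prop := out = get_activity_summary_alt activities
instance (activities : List String) (out : List (String × Int)) : Decidable (Spec_get_activity_summary activities out) := by unfold Spec_get_activity_summary; infer_instance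

-- ===== CLAIM (what is proved, stated in full; the proofs are below) =====
def Claim_equal_get_activity_summary : Prop := ∀ (activities : List String), Dom_get_activity_summary activities → Spec_get_activity_summary activities (get_activity_summary activities)

-- ===== LEMMAS AND PROOFS =====

-- priority classification of one activity (proof-only helper, shared characterisation of both programs)
def pvClassify (activity : String) : String :=
  let low := PySem.Str.lower activity
  match pvRules.find? (fun r => r.2.any (fun k => PySem.Str.isIn k low)) with
  | some r => r.1
  | none => "infrastructure"

-- A's loop body, with the branch chosen, is exactly "increment the classified key".
theorem stepA_eq (d : PySem.Dict String Int) (a : String) :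
    (let activity_lower := PySem.Str.lower a
     if (["model", "training", "inference", "llm", "rag"].any (fun k => PySem.Str.isIn k activity_lower)) then
       d.insert "ml_development" (d.getD "ml_development" 0 + 1)
     else if (["data", "etl", "pipeline", "sql"].any (fun k => PySem.Str.isIn k activity_lower)) then
       d.insert "data_engineering" (d.getD "data_engineering" 0 + 1)
     else if (["experiment", "research", "benchmark", "evaluat"].any (fun k => PySem.Str.isIn k activity_lower)) then
       d.insert "research" (d.getD "research" 0 + 1)
     else
       d.insert "infrastructure" (d.getD "infrastructure" 0 + 1))
    = d.insert (pvClassify a) (d.getD (pvClassify a) 0 + 1) := by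
  unfold pvClassify pvRules
  cases h1 : (["model", "training", "inference", "llm", "rag"].any (fun k => PySem.Str.isIn k (PySem.Str.lower a))) <;>
  cases h2 : (["data", "etl", "pipeline", "sql"].any (fun k => PySem.Str.isIn k (PySem.Str.lower a))) <;>
  cases h3 : (["experiment", "research", "benchmark", "evaluat"].any (fun k => PySem.Str.isIn k (PySem.Str.lower a))) <;>
  simp only [List.find?, h1, h2, h3, if_true, if_false, Bool.false_eq_true]

-- every label lies among the four initial keys
theorem classify_mem (a : String) :
    pvClassify a ∈ ["ml_development", "data_engineering", "research", "infrastructure"] := by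
  rcases hfind : pvRules.find? (fun r => r.2.any (fun k => PySem.Str.isIn k (PySem.Str.lower a))) with _ | r
  · simp only [pvClassify, hfind]; simp
  · have hr := List.mem_of_find?_eq_some hfind
    simp only [pvClassify, hfind]
    simp only [pvRules, List.mem_cons, List.not_mem_nil, or_false] at hr
    rcases hr with rfl | rfl | rfl <;> simp

-- counting-loop characterisation: folding "insert x (getD x 0 + 1)" over l rewrites every item's value by the count of its key
theorem items_fold (l : List String) (d : PySem.Dict String Int)
    (hn : d.keys.Nodup) (hc : ∀ x ∈ l, d.contains x = true) :
    (l.foldl (fun d x => d.insert x (d.getD x 0 + 1)) d).items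
      = d.items.map (fun p => (p.1, p.2 + (l.count p.1 : Int))) := by
  induction l generalizing d with
  | nil => simp
  | cons x t ih =>
    have hcx : d.contains x = true := hc x (by simp)
    have hstep := ih (d.insert x (d.getD x 0 + 1))
      (PySem.Dict.nodup_keys_insert d x _ hn)
      (fun y hy => by
        rw [PySem.Dict.contains_insert]
        simp [hc y (List.mem_cons_of_mem _ hy)])
    rw [List.foldl_cons, hstep, PySem.Dict.items_insert_of_contains d _ hcx, List.map_map]
    apply List.map_congr_left
    rintro ⟨k, v⟩ hp
    by_cases hpx : k = x
    · subst hpx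
      have hget : d.get? k = some v := PySem.Dict.get?_of_mem_items d hp hn
      have hgd : d.getD k 0 = v := by rw [PySem.Dict.getD_eq_get?_getD, hget]; rfl
      simp [Function.comp, hgd]
      ring
    · simp [Function.comp, hpx, Ne.symm hpx]

-- the label-count of each category equals the length of the corresponding sieve stage
theorem count_classify_p1 (acts : List String) :
    (acts.map pvClassify).count "ml_development"
      = ((acts.map PySem.Str.lower).filter
          (fun a => ["model", "training", "inference", "llm", "rag"].any (fun k => PySem.Str.isIn k a))).length := by
  rw [← List.countP_eq_length_filter]
  simp only [List.countP_filter, List.count_eq_countP, List.countP_map]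
  apply List.countP_congr
  intro a _
  simp only [Function.comp, pvClassify, pvRules]
  cases h1 : (["model", "training", "inference", "llm", "rag"].any (fun k => PySem.Str.isIn k (PySem.Str.lower a))) <;>
  cases h2 : (["data", "etl", "pipeline", "sql"].any (fun k => PySem.Str.isIn k (PySem.Str.lower a))) <;>
  cases h3 : (["experiment", "research", "benchmark", "evaluat"].any (fun k => PySem.Str.isIn k (PySem.Str.lower a))) <;>
  simp only [List.find?, h1, h2, h3] <;> simp_all

theorem count_classify_p2 (acts : List String) :
    (acts.map pvClassify).count "data_engineering"
      = ((((acts.map PySem.Str.lower).filter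
          (fun a => !(["model", "training", "inference", "llm", "rag"].any (fun k => PySem.Str.isIn k a)))).filter
          (fun a => ["data", "etl", "pipeline", "sql"].any (fun k => PySem.Str.isIn k a))).length) := by
  rw [← List.countP_eq_length_filter]
  simp only [List.countP_filter, List.count_eq_countP, List.countP_map]
  apply List.countP_congr
  intro a _
  simp only [Function.comp, pvClassify, pvRules]
  cases h1 : (["model", "training", "inference", "llm", "rag"].any (fun k => PySem.Str.isIn k (PySem.Str.lower a))) <;>
  cases h2 : (["data", "etl", "pipeline", "sql"].any (fun k => PySem.Str.isIn k (PySem.Str.lower a))) <;>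
  cases h3 : (["experiment", "research", "benchmark", "evaluat"].any (fun k => PySem.Str.isIn k (PySem.Str.lower a))) <;>
  simp only [List.find?, h1, h2, h3] <;> simp_all

theorem count_classify_p3 (acts : List String) :
    (acts.map pvClassify).count "research"
      = (((((acts.map PySem.Str.lower).filter
          (fun a => !(["model", "training", "inference", "llm", "rag"].any (fun k => PySem.Str.isIn k a)))).filter
          (fun a => !(["data", "etl", "pipeline", "sql"].any (fun k => PySem.Str.isIn k a)))).filter
          (fun a => ["experiment", "research", "benchmark", "evaluat"].any (fun k => PySem.Str.isIn k a))).length) := by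
  rw [← List.countP_eq_length_filter]
  simp only [List.countP_filter, List.count_eq_countP, List.countP_map]
  apply List.countP_congr
  intro a _
  simp only [Function.comp, pvClassify, pvRules]
  cases h1 : (["model", "training", "inference", "llm", "rag"].any (fun k => PySem.Str.isIn k (PySem.Str.lower a))) <;>
  cases h2 : (["data", "etl", "pipeline", "sql"].any (fun k => PySem.Str.isIn k (PySem.Str.lower a))) <;>
  cases h3 : (["experiment", "research", "benchmark", "evaluat"].any (fun k => PySem.Str.isIn k (PySem.Str.lower a))) <;>
  simp only [List.find?, h1, h2, h3] <;> simp_all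

theorem count_classify_p4 (acts : List String) :
    (acts.map pvClassify).count "infrastructure"
      = (((((acts.map PySem.Str.lower).filter
          (fun a => !(["model", "training", "inference", "llm", "rag"].any (fun k => PySem.Str.isIn k a)))).filter
          (fun a => !(["data", "etl", "pipeline", "sql"].any (fun k => PySem.Str.isIn k a)))).filter
          (fun a => !(["experiment", "research", "benchmark", "evaluat"].any (fun k => PySem.Str.isIn k a)))).length) := by
  rw [← List.countP_eq_length_filter]
  simp only [List.countP_filter, List.count_eq_countP, List.countP_map]
  apply List.countP_congr
  intro a _
  simp only [Function.comp, pvClassify, pvRules]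
  cases h1 : (["model", "training", "inference", "llm", "rag"].any (fun k => PySem.Str.isIn k (PySem.Str.lower a))) <;>
  cases h2 : (["data", "etl", "pipeline", "sql"].any (fun k => PySem.Str.isIn k (PySem.Str.lower a))) <;>
  cases h3 : (["experiment", "research", "benchmark", "evaluat"].any (fun k => PySem.Str.isIn k (PySem.Str.lower a))) <;>
  simp only [List.find?, h1, h2, h3] <;> simp_all

-- ===== VERDICT (by name: the statement is the Claim_ definition above) =====
theorem get_activity_summary_spec : Claim_equal_get_activity_summary := by
  intro activities _
  unfold Spec_get_activity_summary
  simp only [get_activity_summary, get_activity_summary_alt, pvRules, List.foldl_cons, List.foldl_nil]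
  have hfun : (fun (d : PySem.Dict String Int) activity =>
      let activity_lower := PySem.Str.lower activity
      if (["model", "training", "inference", "llm", "rag"].any (fun k => PySem.Str.isIn k activity_lower)) then
        d.insert "ml_development" (d.getD "ml_development" 0 + 1)
      else if (["data", "etl", "pipeline", "sql"].any (fun k => PySem.Str.isIn k activity_lower)) then
        d.insert "data_engineering" (d.getD "data_engineering" 0 + 1)
      else if (["experiment", "research", "benchmark", "evaluat"].any (fun k => PySem.Str.isIn k activity_lower)) then
        d.insert "research" (d.getD "research" 0 + 1)
      else
        d.insert "infrastructure" (d.getD "infrastructure" 0 + 1))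
      = fun d a => d.insert (pvClassify a) (d.getD (pvClassify a) 0 + 1) := by
    funext d a; exact stepA_eq d a
  rw [hfun, ← List.foldl_map (f := pvClassify)
      (g := fun (d : PySem.Dict String Int) x => d.insert x (d.getD x 0 + 1)),
    items_fold (activities.map pvClassify) _ (by decide)
      (fun x hx => by
        rcases List.mem_map.mp hx with ⟨a, _, rfl⟩
        have h := classify_mem a
        simp only [List.mem_cons, List.not_mem_nil, or_false] at h
        rcases h with h | h | h | h <;> rw [h] <;> decide)]
  have hitems : (PySem.Dict.ofList [("ml_development", (0 : Int)), ("data_engineering", 0), ("research", 0), ("infrastructure", 0)]).items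
      = [("ml_development", (0 : Int)), ("data_engineering", 0), ("research", 0), ("infrastructure", 0)] := rfl
  rw [hitems]
  simp only [List.map_cons, List.map_nil]
  rw [count_classify_p1 activities, count_classify_p2 activities,
      count_classify_p3 activities, count_classify_p4 activities]
  simp [PySem.Dict.insert, PySem.Dict.empty]
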